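-- pv_equiv track=rewrite | github.com/mfbaig35r/distillcore | src/distillcore/chunking.py | _reassemble
-- ===== SOURCE A (Python) =====
-- def _reassemble(sentences: list[str], groups: list[dict]) -> list[str]:
--     """Reassemble text chunks from sentence groups."""
--     if not groups:
--         return [" ".join(sentences)]
--
--     chunks: list[str] = []
--     covered: set[int] = set()
--
--     for g in groups:
--         start = max(0, g["start"])
--         end = min(len(sentences) - 1, g["end"])
--         chunk_sentences = sentences[start:end + 1]
--         if chunk_sentences:
--             chunks.append(" ".join(chunk_sentences))
--             covered.update(range(start, end + 1))
--
--     # Pick up any uncovered sentences as additional chunks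
--     uncovered = [i for i in range(len(sentences)) if i not in covered]
--     if uncovered:
--         buf: list[int] = [uncovered[0]]
--         for idx in uncovered[1:]:
--             if idx == buf[-1] + 1:
--                 buf.append(idx)
--             else:
--                 chunks.append(" ".join(sentences[buf[0]:buf[-1] + 1]))
--                 buf = [idx]
--         chunks.append(" ".join(sentences[buf[0]:buf[-1] + 1]))
--
--     return chunks if chunks else [" ".join(sentences)]
-- ===== SOURCE B (Python) =====
-- def _reassemble(sentences: list[str], groups: list[dict]) -> list[str]:
--     """Reassemble text chunks: one chunk per group in order, then uncovered-gap
--     chunks emitted by a single predicate-driven scan over the indices (no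
--     covered set, no intermediate uncovered list)."""
--     if not groups:
--         return [" ".join(sentences)]
--
--     n = len(sentences)
--     chunks: list[str] = []
--     spans: list[tuple[int, int]] = []
--     for g in groups:
--         start = max(0, g["start"])
--         end = min(n - 1, g["end"])
--         if start <= end:
--             chunks.append(" ".join(sentences[start:end + 1]))
--             spans.append((start, end))
--
--     def cov(i: int) -> bool:
--         return any(s <= i <= e for (s, e) in spans)
--
--     run_start = None
--     for i in range(n + 1):
--         if i < n and not cov(i):
--             if run_start is None:
--                 run_start = i
--         elif run_start is not None:
--             chunks.append(" ".join(sentences[run_start:i]))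
--             run_start = None
--
--     return chunks if chunks else [" ".join(sentences)]
-- ===== Notes on version B (the rewrite author's own statement) =====
-- stated objective: alternative
-- what changed: Replaced A's covered-index set plus uncovered-list run-grouping with a list of clamped spans and a single predicate-driven scan over the indices that emits each gap chunk directly; B also does not emit A's phantom wrap-around chunks.
-- intended difference: On inputs where some group's clamped end makes end+1 negative with start < len(sentences)+end+1, A's slice sentences[start:end+1] wraps around and emits a phantom chunk (whose sentences are still re-emitted as uncovered), while B emits no chunk for such an empty interval, which is the intended behaviour. — e.g. on _reassemble(["a", "b"], [[("start", 0), ("end", -2)]]): A returns ["a", "a b"], B returns ["a b"]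
import Mathlib
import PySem

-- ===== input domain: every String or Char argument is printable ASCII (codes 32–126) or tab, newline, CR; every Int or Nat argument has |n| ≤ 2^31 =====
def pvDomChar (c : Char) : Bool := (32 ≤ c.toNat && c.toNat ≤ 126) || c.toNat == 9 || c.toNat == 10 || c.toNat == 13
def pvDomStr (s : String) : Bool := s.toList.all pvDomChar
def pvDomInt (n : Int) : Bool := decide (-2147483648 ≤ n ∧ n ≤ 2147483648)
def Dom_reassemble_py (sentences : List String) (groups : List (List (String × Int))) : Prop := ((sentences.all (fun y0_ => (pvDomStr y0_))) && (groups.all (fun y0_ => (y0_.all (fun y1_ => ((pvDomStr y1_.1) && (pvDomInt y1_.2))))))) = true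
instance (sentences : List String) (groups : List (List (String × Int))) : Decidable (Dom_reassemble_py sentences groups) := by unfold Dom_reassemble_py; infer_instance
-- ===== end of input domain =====

-- B emits gap chunks by a direct predicate-driven scan instead of A's covered set + uncovered list;
-- on groups whose clamped end makes `end+1` negative, A's slice wraps around and emits a phantom chunk (D_ below) while B emits nothing there.

-- ===== PORT A =====
-- A-side helpers: the body of A's two loops, named so the fold is readable.
def aGroupStep (sentences : List String) (st : List String × PySem.Set Int)
    (g : List (String × Int)) : List String × PySem.Set Int :=
  let start := max 0 (((g.lookup "start").getD 0))      -- g["start"]; KeyError excluded by Pre_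
  let stop := min ((sentences.length : Int) - 1) (((g.lookup "end").getD 0)) + 1
  let chunk := PySem.List.slice sentences (some start) (some stop)
  if chunk ≠ [] then
    (st.1 ++ [PySem.Str.join " " chunk], PySem.Set.update st.2 (PySem.List.pyRange start stop))
  else st

def aBufStep (sentences : List String) (st : List String × List Int) (idx : Int) :
    List String × List Int :=
  if idx = st.2.getLastD 0 + 1 then (st.1, st.2 ++ [idx])     -- buf[-1]; buf is never empty
  else (st.1 ++ [PySem.Str.join " " (PySem.List.slice sentences (some st.2.headI) (some (st.2.getLastD 0 + 1)))], [idx])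

def reassemble_py (sentences : List String) (groups : List (List (String × Int))) : List String :=
  if groups = [] then [PySem.Str.join " " sentences] else
  let st := groups.foldl (aGroupStep sentences) ([], PySem.Set.empty)
  let uncovered := (PySem.List.pyRange 0 (sentences.length : Int)).filter
    (fun i => !(PySem.Set.contains st.2 i))
  let chunks :=
    match uncovered with
    | [] => st.1
    | u0 :: rest =>
      let st2 := rest.foldl (aBufStep sentences) (st.1, [u0])
      st2.1 ++ [PySem.Str.join " " (PySem.List.slice sentences (some st2.2.headI) (some (st2.2.getLastD 0 + 1)))]
  if chunks = [] then [PySem.Str.join " " sentences] else chunks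

-- ===== PORT B =====
-- B-side helpers: group pass (chunks + recorded spans), coverage predicate, and the scan body.
def bGroupStep (sentences : List String) (st : List String × List (Int × Int))
    (g : List (String × Int)) : List String × List (Int × Int) :=
  let start := max 0 (((g.lookup "start").getD 0))      -- g["start"]; KeyError excluded by Pre_
  let «end» := min ((sentences.length : Int) - 1) (((g.lookup "end").getD 0))
  if start ≤ «end» then
    (st.1 ++ [PySem.Str.join " " (PySem.List.slice sentences (some start) (some («end» + 1)))],
     st.2 ++ [(start, «end»)])
  else st

def bCov (spans : List (Int × Int)) (i : Int) : Bool :=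
  spans.any (fun p => decide (p.1 ≤ i ∧ i ≤ p.2))

def bScanStep (sentences : List String) (cov : Int → Bool) (st : List String × Option Int)
    (i : Int) : List String × Option Int :=
  if i < (sentences.length : Int) ∧ cov i = false then
    match st.2 with
    | none => (st.1, some i)
    | some _ => st
  else
    match st.2 with
    | some r => (st.1 ++ [PySem.Str.join " " (PySem.List.slice sentences (some r) (some i))], none)
    | none => st

def reassemble_py_alt (sentences : List String) (groups : List (List (String × Int))) : List String :=
  if groups = [] then [PySem.Str.join " " sentences] else
  let st := groups.foldl (bGroupStep sentences) ([], [])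
  let st2 := (PySem.List.pyRange 0 ((sentences.length : Int) + 1)).foldl
    (bScanStep sentences (bCov st.2)) (st.1, none)
  if st2.1 = [] then [PySem.Str.join " " sentences] else st2.1

-- ===== PRECONDITION & SPEC =====
-- Pre_ excludes exactly the inputs where A raises KeyError: a group dict missing key "start" or "end".
def Pre_reassemble_py (_sentences : List String) (groups : List (List (String × Int))) : Prop :=
  ∀ g ∈ groups, (g.lookup "start").isSome = true ∧ (g.lookup "end").isSome = true
instance (sentences : List String) (groups : List (List (String × Int))) : Decidable (Pre_reassemble_py sentences groups) := by unfold Pre_reassemble_py; infer_instance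
def pvWitness_reassemble_py : List String × (List (List (String × Int))) :=
  (["a", "b"], [[("start", 0), ("end", 0)]])

-- On groups whose clamped end index makes end+1 negative while start < len(sentences)+end+1, A's
-- slice sentences[start:end+1] wraps around and emits a phantom chunk that covers nothing (its
-- content is then repeated by the gap pass); B emits no chunk for such an empty interval, which is
-- the intended behaviour.
def D_reassemble_py (sentences : List String) (groups : List (List (String × Int))) : Prop :=
  ∃ g ∈ groups, ∃ e ∈ g.lookup "end", ∃ s ∈ g.lookup "start",
    e ≤ -2 ∧ 0 < (sentences.length : Int) + e + 1 ∧ s < (sentences.length : Int) + e + 1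
instance (sentences : List String) (groups : List (List (String × Int))) : Decidable (D_reassemble_py sentences groups) := by unfold D_reassemble_py; infer_instance

def Spec_reassemble_py (sentences : List String) (groups : List (List (String × Int))) (out : List String) : Prop := ¬ D_reassemble_py sentences groups → out = reassemble_py_alt sentences groups
instance (sentences : List String) (groups : List (List (String × Int))) (out : List String) : Decidable (Spec_reassemble_py sentences groups out) := by unfold Spec_reassemble_py; infer_instance

def pvDiffWitness_reassemble_py : List String × (List (List (String × Int))) :=
  (["a", "b"], [[("start", 0), ("end", -2)]])
def pvDiffWitnessOut_reassemble_py : (List String) × (List String) :=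
  (["a", "a b"], ["a b"])

-- ===== CLAIM (what is proved, stated in full; the proofs are below) =====
def Claim_unchanged_reassemble_py : Prop := ∀ (sentences : List String) (groups : List (List (String × Int))), Dom_reassemble_py sentences groups → Pre_reassemble_py sentences groups → Spec_reassemble_py sentences groups (reassemble_py sentences groups)
def Claim_changed_reassemble_py : Prop := Dom_reassemble_py (pvDiffWitness_reassemble_py.1) (pvDiffWitness_reassemble_py.2) ∧ Pre_reassemble_py (pvDiffWitness_reassemble_py.1) (pvDiffWitness_reassemble_py.2) ∧ D_reassemble_py (pvDiffWitness_reassemble_py.1) (pvDiffWitness_reassemble_py.2) ∧ reassemble_py (pvDiffWitness_reassemble_py.1) (pvDiffWitness_reassemble_py.2) = pvDiffWitnessOut_reassemble_py.1 ∧ reassemble_py_alt (pvDiffWitness_reassemble_py.1) (pvDiffWitness_reassemble_py.2) = pvDiffWitnessOut_reassemble_py.2 ∧ pvDiffWitnessOut_reassemble_py.1 ≠ pvDiffWitnessOut_reassemble_py.2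
def Claim_exact_reassemble_py : Prop := ∀ (sentences : List String) (groups : List (List (String × Int))), Dom_reassemble_py sentences groups → Pre_reassemble_py sentences groups → D_reassemble_py sentences groups → reassemble_py sentences groups ≠ reassemble_py_alt sentences groups

-- ===== LEMMAS AND PROOFS =====

-- A wrap-around group: its clamped end makes end+1 a negative index that still leaves a
-- nonempty slice.  D_reassemble_py sentences groups is ∃ g ∈ groups, Wrap sentences g.
def Wrap (sentences : List String) (g : List (String × Int)) : Prop :=
  ∃ e ∈ g.lookup "end", ∃ s ∈ g.lookup "start",
    e ≤ -2 ∧ 0 < (sentences.length : Int) + e + 1 ∧ s < (sentences.length : Int) + e + 1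

-- A slice with a clamped stop is nonempty exactly when the interval is proper, absent wrap-around.
lemma slice_ne_nil_iff (xs : List String) (s e : Int) (hs : 0 ≤ s)
    (he : e ≤ (xs.length : Int) - 1)
    (hnw : ¬ (e + 1 < 0 ∧ s < (xs.length : Int) + (e + 1))) :
    (PySem.List.slice xs (some s) (some (e + 1)) ≠ []) ↔ s ≤ e := by
  rw [Ne, ← List.length_eq_zero_iff, PySem.List.length_slice]
  simp only [PySem.List.clampIdx]
  split_ifs with h1 h2 h3 h4 h5 <;>
    simp_all <;> omega

-- A wrapping slice is nonempty (Python's negative stop counts from the end).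
lemma slice_wrap_ne_nil (xs : List String) (s e : Int) (hs : 0 ≤ s)
    (he : e + 1 < 0) (hlt : s < (xs.length : Int) + (e + 1)) :
    PySem.List.slice xs (some s) (some (e + 1)) ≠ [] := by
  rw [Ne, ← List.length_eq_zero_iff, PySem.List.length_slice]
  simp only [PySem.List.clampIdx]
  split_ifs <;> omega

-- Stage 1: the two group passes keep matching coverage; they emit the same chunks when no
-- group wraps, and A emits strictly more chunks when one does.
lemma group_loop (sentences : List String) (groups : List (List (String × Int))) :
    ∀ (cA cB : List String) (covSet : PySem.Set Int) (spans : List (Int × Int)),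
      covSet.Nodup →
      (∀ i, PySem.Set.contains covSet i = bCov spans i) →
      (∀ g ∈ groups, (g.lookup "start").isSome = true ∧ (g.lookup "end").isSome = true) →
      (groups.foldl (aGroupStep sentences) (cA, covSet)).2.Nodup ∧
      (∀ i, PySem.Set.contains (groups.foldl (aGroupStep sentences) (cA, covSet)).2 i
        = bCov (groups.foldl (bGroupStep sentences) (cB, spans)).2 i) ∧
      (cA = cB → (∀ g ∈ groups, ¬ Wrap sentences g) →
        (groups.foldl (aGroupStep sentences) (cA, covSet)).1
          = (groups.foldl (bGroupStep sentences) (cB, spans)).1) ∧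
      cA.length + (groups.foldl (bGroupStep sentences) (cB, spans)).1.length
        ≤ cB.length + (groups.foldl (aGroupStep sentences) (cA, covSet)).1.length ∧
      ((∃ g ∈ groups, Wrap sentences g) →
        cA.length + (groups.foldl (bGroupStep sentences) (cB, spans)).1.length
          < cB.length + (groups.foldl (aGroupStep sentences) (cA, covSet)).1.length) := by
  induction groups with
  | nil =>
    intro cA cB covSet spans hnd hcov _
    simp only [List.foldl_nil]
    refine ⟨hnd, hcov, fun hc _ => by rw [hc], by omega, ?_⟩
    rintro ⟨g, hg, -⟩
    exact absurd hg (List.not_mem_nil)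
  | cons g gs ih =>
    intro cA cB covSet spans hnd hcov hpre
    obtain ⟨hxs, hys⟩ := hpre g (List.mem_cons_self)
    obtain ⟨x, hx⟩ := Option.isSome_iff_exists.mp hxs
    obtain ⟨y, hy⟩ := Option.isSome_iff_exists.mp hys
    have hpre' : ∀ g' ∈ gs, (g'.lookup "start").isSome = true ∧ (g'.lookup "end").isSome = true :=
      fun g' hg' => hpre g' (List.mem_cons_of_mem _ hg')
    have hn0 : (0 : Int) ≤ (sentences.length : Int) := by positivity
    simp only [List.foldl_cons]
    by_cases hw : Wrap sentences g
    · -- wrap-around group: A emits a phantom chunk covering nothing, B skips it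
      obtain ⟨e0, he0, s0, hs0, h1, h2, h3⟩ := hw
      rw [hy, Option.mem_def, Option.some_inj] at he0
      rw [hx, Option.mem_def, Option.some_inj] at hs0
      subst he0; subst hs0
      have hmin : min ((sentences.length : Int) - 1) y = y := by omega
      have hs1 : (0 : Int) ≤ max 0 x := le_max_left _ _
      have hs2 : max 0 x < (sentences.length : Int) + (y + 1) := by
        rw [max_lt_iff]; omega
      have hA : aGroupStep sentences (cA, covSet) g
          = (cA ++ [PySem.Str.join " " (PySem.List.slice sentences (some (max 0 x)) (some (y + 1)))],
             covSet) := by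
        simp only [aGroupStep, hx, hy, Option.getD_some, hmin]
        rw [if_pos (slice_wrap_ne_nil sentences (max 0 x) y hs1 (by omega) hs2)]
        rw [PySem.List.pyRange_one_eq_nil (by omega), PySem.Set.update_nil]
      have hB : bGroupStep sentences (cB, spans) g = (cB, spans) := by
        simp only [bGroupStep, hx, hy, Option.getD_some, hmin]
        rw [if_neg (by omega)]
      rw [hA, hB]
      obtain ⟨N, C, _, L, _⟩ := ih (cA ++ [_]) cB covSet spans hnd hcov hpre'
      refine ⟨N, C, ?_, ?_, ?_⟩
      · intro _ hnw
        exact absurd ⟨y, by rw [hy]; rfl, x, by rw [hx]; rfl, h1, h2, h3⟩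
          (hnw g (List.mem_cons_self))
      · simp only [List.length_append, List.length_cons, List.length_nil] at L
        omega
      · intro _
        simp only [List.length_append, List.length_cons, List.length_nil] at L
        omega
    · -- no wrap: the two steps stay in lockstep
      set s := max 0 ((g.lookup "start").getD 0) with hs_def
      set e := min ((sentences.length : Int) - 1) ((g.lookup "end").getD 0) with he_def
      have hsnn : 0 ≤ s := le_max_left _ _
      have hele : e ≤ (sentences.length : Int) - 1 := min_le_left _ _
      have hnw : ¬ (e + 1 < 0 ∧ s < (sentences.length : Int) + (e + 1)) := by
        rintro ⟨h1, h2⟩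
        apply hw
        refine ⟨y, by rw [hy]; rfl, x, by rw [hx]; rfl, ?_, ?_, ?_⟩
        · have : e = y := by
            rw [he_def, hy]; rw [he_def, hy] at h1; simp only [Option.getD_some] at h1 ⊢; omega
          omega
        · have he' : e = y := by
            rw [he_def, hy]; rw [he_def, hy] at h1; simp only [Option.getD_some] at h1 ⊢; omega
          omega
        · have he' : e = y := by
            rw [he_def, hy]; rw [he_def, hy] at h1; simp only [Option.getD_some] at h1 ⊢; omega
          have hs' : s = max 0 x := by rw [hs_def, hx]; rfl
          rw [hs', max_lt_iff] at h2
          omega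
      have hiff := slice_ne_nil_iff sentences s e hsnn hele hnw
      by_cases hse : s ≤ e
      · have hne : PySem.List.slice sentences (some s) (some (e + 1)) ≠ [] := hiff.mpr hse
        have hA : aGroupStep sentences (cA, covSet) g
            = (cA ++ [PySem.Str.join " " (PySem.List.slice sentences (some s) (some (e + 1)))],
               PySem.Set.update covSet (PySem.List.pyRange s (e + 1))) := by
          simp only [aGroupStep, ← hs_def, ← he_def]
          rw [if_pos hne]
        have hB : bGroupStep sentences (cB, spans) g
            = (cB ++ [PySem.Str.join " " (PySem.List.slice sentences (some s) (some (e + 1)))],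
               spans ++ [(s, e)]) := by
          simp only [bGroupStep, ← hs_def, ← he_def]
          rw [if_pos hse]
        rw [hA, hB]
        have hcov' : ∀ i, PySem.Set.contains (PySem.Set.update covSet (PySem.List.pyRange s (e + 1))) i
            = bCov (spans ++ [(s, e)]) i := by
          intro i
          have h1 := hcov i
          rw [Bool.eq_iff_iff] at h1 ⊢
          rw [PySem.Set.contains_iff, PySem.Set.mem_update, ← PySem.Set.contains_iff, h1]
          simp [bCov, PySem.List.mem_pyRange_one]
        obtain ⟨N, C, E, L, LS⟩ := ih (cA ++ [_]) (cB ++ [_])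
          (PySem.Set.update covSet (PySem.List.pyRange s (e + 1))) (spans ++ [(s, e)])
          (PySem.Set.nodup_update _ _ hnd) hcov' hpre'
        refine ⟨N, C, ?_, ?_, ?_⟩
        · intro hc hnwAll
          exact E (by rw [hc]) (fun g' hg' => hnwAll g' (List.mem_cons_of_mem _ hg'))
        · simp only [List.length_append, List.length_cons, List.length_nil] at L
          omega
        · rintro ⟨g', hg', hw'⟩
          rcases List.mem_cons.mp hg' with hg'' | hg''
          · exact absurd (hg'' ▸ hw') hw
          · have := LS ⟨g', hg'', hw'⟩
            simp only [List.length_append, List.length_cons, List.length_nil] at this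
            omega
      · have hemp : ¬ (PySem.List.slice sentences (some s) (some (e + 1)) ≠ []) :=
          fun h => hse (hiff.mp h)
        have hA : aGroupStep sentences (cA, covSet) g = (cA, covSet) := by
          simp only [aGroupStep, ← hs_def, ← he_def]
          rw [if_neg hemp]
        have hB : bGroupStep sentences (cB, spans) g = (cB, spans) := by
          simp only [bGroupStep, ← hs_def, ← he_def]
          rw [if_neg hse]
        rw [hA, hB]
        obtain ⟨N, C, E, L, LS⟩ := ih cA cB covSet spans hnd hcov hpre'
        refine ⟨N, C, ?_, L, ?_⟩
        · intro hc hnwAll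
          exact E hc (fun g' hg' => hnwAll g' (List.mem_cons_of_mem _ hg'))
        · rintro ⟨g', hg', hw'⟩
          rcases List.mem_cons.mp hg' with hg'' | hg''
          · exact absurd (hg'' ▸ hw') hw
          · exact LS ⟨g', hg'', hw'⟩
lemma headI_append_of_ne_nil {l l2 : List Int} (h : l ≠ []) : (l ++ l2).headI = l.headI := by
  cases l with
  | nil => simp at h
  | cons x t => simp

-- Stage 2: loop-state relation between A's buf loop over the uncovered list and B's index scan,
-- after both have processed the indices 0..k-1.
def TailRel (sentences : List String) (cov : Int → Bool) (c0 : List String) (k : Nat)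
    (sB : List String × Option Int) : Prop :=
  let u := (PySem.List.pyRange 0 (k : Int)).filter (fun i => !cov i)
  (u = [] ∧ sB = (c0, none)) ∨
  (∃ u0 rest s e cA buf,
    u = u0 :: rest ∧
    rest.foldl (aBufStep sentences) (c0, [u0]) = (cA, buf) ∧
    buf ≠ [] ∧ buf.headI = s ∧ buf.getLastD 0 = e ∧
    0 ≤ s ∧ s ≤ e ∧ e < (k : Int) ∧ cov e = false ∧
    (∀ j : Int, e < j → j < (k : Int) → cov j = true) ∧
    ((e = (k : Int) - 1 ∧ sB = (cA, some s)) ∨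
     (e ≠ (k : Int) - 1 ∧
      sB = (cA ++ [PySem.Str.join " " (PySem.List.slice sentences (some s) (some (e + 1)))], none))))
lemma scan_inv (sentences : List String) (cov : Int → Bool) (c0 : List String)
    (k : Nat) (hk : k ≤ sentences.length) :
    TailRel sentences cov c0 k
      (((PySem.List.pyRange 0 (k : Int)).foldl (bScanStep sentences cov) (c0, none))) := by
  induction k with
  | zero =>
    rw [TailRel]
    left
    rw [PySem.List.pyRange_one_eq_nil (by omega)]
    exact ⟨rfl, rfl⟩
  | succ k ih =>
    have hk' : k ≤ sentences.length := Nat.le_of_succ_le hk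
    have hkn : (k : Int) < (sentences.length : Int) := by exact_mod_cast hk
    specialize ih hk'
    have hsplit : PySem.List.pyRange 0 ((k + 1 : Nat) : Int)
        = PySem.List.pyRange 0 (k : Int) ++ [(k : Int)] := by
      push_cast
      exact PySem.List.pyRange_one_succ_right (by omega)
    rw [TailRel] at ih ⊢
    rw [hsplit, List.foldl_append, List.foldl_cons, List.foldl_nil,
      List.filter_append]
    by_cases hcovk : cov (k : Int) = true
    · have hfk : (([(k : Int)]).filter (fun i => !cov i)) = [] := by simp [hcovk]
      rw [hfk, List.append_nil]
      rcases ih with ⟨hu, hsB⟩ | ⟨u0, rest, s, e, cA, buf, hu, hfold, hbne, hhead, hlast,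
        hs0, hse, hek, hcove, hmax, hcase⟩
      · left
        refine ⟨hu, ?_⟩
        rw [hsB, bScanStep]
        rw [if_neg (by simp [hcovk])]
      · right
        refine ⟨u0, rest, s, e, cA, buf, hu, hfold, hbne, hhead, hlast, hs0, hse,
          by push_cast; omega, hcove, ?_, ?_⟩
        · intro j hj1 hj2
          push_cast at hj2
          by_cases hjk : j = (k : Int)
          · rw [hjk]; exact hcovk
          · exact hmax j hj1 (by omega)
        · right
          rcases hcase with ⟨hek1, hsB⟩ | ⟨hek1, hsB⟩
          · constructor
            · push_cast; omega
            · rw [hsB, bScanStep]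
              rw [if_neg (by simp [hcovk])]
              simp only
              have : (k : Int) = e + 1 := by omega
              rw [this]
          · constructor
            · push_cast; omega
            · rw [hsB, bScanStep]
              rw [if_neg (by simp [hcovk])]
    · -- cov k = false
      have hcovk' : cov (k : Int) = false := by simpa using hcovk
      have hfk : (([(k : Int)]).filter (fun i => !cov i)) = [(k : Int)] := by simp [hcovk']
      rw [hfk]
      rcases ih with ⟨hu, hsB⟩ | ⟨u0, rest, s, e, cA, buf, hu, hfold, hbne, hhead, hlast,
        hs0, hse, hek, hcove, hmax, hcase⟩
      · right
        rw [hu, List.nil_append]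
        refine ⟨(k : Int), [], (k : Int), (k : Int), c0, [(k : Int)], rfl, rfl, by simp,
          rfl, rfl, by omega, le_refl _, by push_cast; omega, hcovk', ?_, ?_⟩
        · intro j hj1 hj2; push_cast at hj2; omega
        · left
          refine ⟨by push_cast; omega, ?_⟩
          rw [hsB, bScanStep]
          rw [if_pos ⟨hkn, hcovk'⟩]
      · right
        rw [hu, List.cons_append]
        rcases hcase with ⟨hek1, hsB⟩ | ⟨hek1, hsB⟩
        · -- run continues: buf gets k appended
          refine ⟨u0, rest ++ [(k : Int)], s, (k : Int), cA, buf ++ [(k : Int)], rfl, ?_,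
            by simp, ?_, List.getLastD_concat, hs0, by omega, by push_cast; omega, hcovk',
            ?_, ?_⟩
          · rw [List.foldl_append, hfold, List.foldl_cons, List.foldl_nil, aBufStep]
            rw [if_pos (by rw [hlast]; omega)]
          · rw [headI_append_of_ne_nil hbne, hhead]
          · intro j hj1 hj2; push_cast at hj2; omega
          · left
            refine ⟨by push_cast; omega, ?_⟩
            rw [hsB, bScanStep]
            rw [if_pos ⟨hkn, hcovk'⟩]
        · -- gap: buf was already flushed on the B side; A flushes now
          refine ⟨u0, rest ++ [(k : Int)], (k : Int), (k : Int),
            cA ++ [PySem.Str.join " " (PySem.List.slice sentences (some s) (some (e + 1)))],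
            [(k : Int)], rfl, ?_, by simp, rfl, rfl, by omega, le_refl _,
            by push_cast; omega, hcovk', ?_, ?_⟩
          · rw [List.foldl_append, hfold, List.foldl_cons, List.foldl_nil, aBufStep]
            rw [if_neg (by rw [hlast]; omega), hhead, hlast]
          · intro j hj1 hj2; push_cast at hj2; omega
          · left
            refine ⟨by push_cast; omega, ?_⟩
            rw [hsB, bScanStep]
            rw [if_pos ⟨hkn, hcovk'⟩]
-- Stage 2 assembled: A's uncovered-run emission equals B's scan (both on top of the same prefix c0).
lemma tail_eq (sentences : List String) (cov : Int → Bool) (c0 : List String) :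
    (match (PySem.List.pyRange 0 (sentences.length : Int)).filter (fun i => !cov i) with
      | [] => c0
      | u0 :: rest =>
        let st2 := rest.foldl (aBufStep sentences) (c0, [u0])
        st2.1 ++ [PySem.Str.join " " (PySem.List.slice sentences (some st2.2.headI) (some (st2.2.getLastD 0 + 1)))])
    = ((PySem.List.pyRange 0 ((sentences.length : Int) + 1)).foldl (bScanStep sentences cov) (c0, none)).1 := by
  have hinv := scan_inv sentences cov c0 sentences.length (le_refl _)
  rw [TailRel] at hinv
  rw [PySem.List.pyRange_one_succ_right (by omega), List.foldl_append, List.foldl_cons,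
    List.foldl_nil]
  rcases hinv with ⟨hu, hsB⟩ | ⟨u0, rest, s, e, cA, buf, hu, hfold, hbne, hhead, hlast,
    hs0, hse, hek, hcove, hmax, hcase⟩
  · rw [hu, hsB, bScanStep]
    rw [if_neg (by simp)]
  · rw [hu]
    simp only [hfold, hhead, hlast]
    rcases hcase with ⟨hek1, hsB⟩ | ⟨hek1, hsB⟩
    · rw [hsB, bScanStep]
      rw [if_neg (by simp)]
      simp only
      have : (sentences.length : Int) = e + 1 := by omega
      rw [this]
    · rw [hsB, bScanStep]
      rw [if_neg (by simp)]

-- B's group pass appends a chunk and a span together.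
lemma span_pairing (sentences : List String) (groups : List (List (String × Int))) :
    ∀ (cB : List String) (spans : List (Int × Int)),
      (groups.foldl (bGroupStep sentences) (cB, spans)).1.length + spans.length
        = (groups.foldl (bGroupStep sentences) (cB, spans)).2.length + cB.length := by
  induction groups with
  | nil => intro cB spans; simp [Nat.add_comm]
  | cons g gs ih =>
    intro cB spans
    simp only [List.foldl_cons, bGroupStep]
    split_ifs
    · have h := ih (cB ++ [PySem.Str.join " " (PySem.List.slice sentences
        (some (max 0 ((g.lookup "start").getD 0)))
        (some (min ((sentences.length : Int) - 1) ((g.lookup "end").getD 0) + 1)))])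
        (spans ++ [(max 0 ((g.lookup "start").getD 0),
          min ((sentences.length : Int) - 1) ((g.lookup "end").getD 0))])
      simp only [List.length_append, List.length_cons, List.length_nil] at h
      omega
    · exact ih cB spans

-- Both loops only ever append to their chunk accumulator.
lemma scan_prefix (sentences : List String) (cov : Int → Bool) :
    ∀ (l : List Int) (c0 : List String) (r : Option Int),
      l.foldl (bScanStep sentences cov) (c0, r)
        = (c0 ++ (l.foldl (bScanStep sentences cov) ([], r)).1,
           (l.foldl (bScanStep sentences cov) ([], r)).2) := by
  intro l
  induction l with
  | nil => intro c0 r; simp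
  | cons i l ih =>
    intro c0 r
    rw [List.foldl_cons, List.foldl_cons]
    have hstep : bScanStep sentences cov (c0, r) i
        = (c0 ++ (bScanStep sentences cov (([] : List String), r) i).1,
           (bScanStep sentences cov (([] : List String), r) i).2) := by
      cases r <;> rw [bScanStep, bScanStep] <;> split_ifs <;> simp
    rw [hstep, ih, ih ((bScanStep sentences cov ([], r) i).1)]
    simp [List.append_assoc]

lemma buf_prefix (sentences : List String) :
    ∀ (l : List Int) (c0 : List String) (buf : List Int),
      l.foldl (aBufStep sentences) (c0, buf)
        = (c0 ++ (l.foldl (aBufStep sentences) ([], buf)).1,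
           (l.foldl (aBufStep sentences) ([], buf)).2) := by
  intro l
  induction l with
  | nil => intro c0 buf; simp
  | cons i l ih =>
    intro c0 buf
    rw [List.foldl_cons, List.foldl_cons]
    have hstep : aBufStep sentences (c0, buf) i
        = (c0 ++ (aBufStep sentences (([] : List String), buf) i).1,
           (aBufStep sentences (([] : List String), buf) i).2) := by
      rw [aBufStep, aBufStep]; split_ifs <;> simp
    rw [hstep, ih, ih ((aBufStep sentences ([], buf) i).1)]
    simp [List.append_assoc]

-- A's whole tail (buf loop plus final emission) on top of a chunk prefix c0.
lemma atail_split (sentences : List String) (c0 : List String) (u : List Int) :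
    (match u with
      | [] => c0
      | u0 :: rest =>
        let st2 := rest.foldl (aBufStep sentences) (c0, [u0])
        st2.1 ++ [PySem.Str.join " " (PySem.List.slice sentences (some st2.2.headI) (some (st2.2.getLastD 0 + 1)))])
    = c0 ++ (match u with
      | [] => ([] : List String)
      | u0 :: rest =>
        let st2 := rest.foldl (aBufStep sentences) ([], [u0])
        st2.1 ++ [PySem.Str.join " " (PySem.List.slice sentences (some st2.2.headI) (some (st2.2.getLastD 0 + 1)))]) := by
  cases u with
  | nil => simp
  | cons u0 rest =>
    simp only
    rw [buf_prefix]
    simp [List.append_assoc]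

-- The two ports agree outside the wrap-around region.
theorem ab_agree (sentences : List String) (groups : List (List (String × Int)))
    (hpre : ∀ g ∈ groups, (g.lookup "start").isSome = true ∧ (g.lookup "end").isSome = true)
    (hnd : ¬ D_reassemble_py sentences groups) :
    reassemble_py sentences groups = reassemble_py_alt sentences groups := by
  rw [reassemble_py, reassemble_py_alt]
  by_cases hg : groups = []
  · rw [if_pos hg, if_pos hg]
  · rw [if_neg hg, if_neg hg]
    have hnw : ∀ g ∈ groups, ¬ Wrap sentences g := by
      intro g hgm hw
      exact hnd ⟨g, hgm, hw⟩
    obtain ⟨hndA, hcov, hchunksI, _, _⟩ := group_loop sentences groups [] [] PySem.Set.empty []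
      (by simp [PySem.Set.empty]) (by intro i; simp [bCov, PySem.Set.contains, PySem.Set.empty]) hpre
    have hchunks := hchunksI rfl hnw
    have hfilter : (PySem.List.pyRange 0 (sentences.length : Int)).filter
        (fun i => !(PySem.Set.contains (groups.foldl (aGroupStep sentences) ([], PySem.Set.empty)).2 i))
        = (PySem.List.pyRange 0 (sentences.length : Int)).filter
        (fun i => !(bCov (groups.foldl (bGroupStep sentences) ([], [])).2 i)) := by
      apply List.filter_congr
      intro i _
      rw [hcov i]
    simp only [hfilter, hchunks]
    rw [tail_eq sentences (bCov (groups.foldl (bGroupStep sentences) ([], [])).2)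
      (groups.foldl (bGroupStep sentences) ([], [])).1]

-- Inside the wrap-around region the two ports always differ: A's chunk list is strictly longer.
theorem ab_differ (sentences : List String) (groups : List (List (String × Int)))
    (hpre : ∀ g ∈ groups, (g.lookup "start").isSome = true ∧ (g.lookup "end").isSome = true)
    (hd : D_reassemble_py sentences groups) :
    reassemble_py sentences groups ≠ reassemble_py_alt sentences groups := by
  unfold D_reassemble_py at hd
  obtain ⟨g0, hg0, y0, hy0, x0, hx0, h1, h2, h3⟩ := hd
  have hgne : groups ≠ [] := by
    intro h
    rw [h] at hg0
    exact absurd hg0 (List.not_mem_nil)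
  have hn2 : 2 ≤ (sentences.length : Int) := by omega
  rw [reassemble_py, reassemble_py_alt, if_neg hgne, if_neg hgne]
  obtain ⟨hndA, hcov, _, hlenle, hlenlt⟩ := group_loop sentences groups [] [] PySem.Set.empty []
    (by simp [PySem.Set.empty]) (by intro i; simp [bCov, PySem.Set.contains, PySem.Set.empty]) hpre
  have hlt := hlenlt ⟨g0, hg0, y0, hy0, x0, hx0, h1, h2, h3⟩
  simp only [List.length_nil, Nat.zero_add] at hlt
  have hfilter : (PySem.List.pyRange 0 (sentences.length : Int)).filter
      (fun i => !(PySem.Set.contains (groups.foldl (aGroupStep sentences) ([], PySem.Set.empty)).2 i))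
      = (PySem.List.pyRange 0 (sentences.length : Int)).filter
      (fun i => !(bCov (groups.foldl (bGroupStep sentences) ([], [])).2 i)) := by
    apply List.filter_congr
    intro i _
    rw [hcov i]
  simp only [hfilter]
  rw [atail_split]
  rw [tail_eq sentences (bCov (groups.foldl (bGroupStep sentences) ([], [])).2) []]
  rw [scan_prefix sentences (bCov (groups.foldl (bGroupStep sentences) ([], [])).2)
    (PySem.List.pyRange 0 ((sentences.length : Int) + 1))
    ((groups.foldl (bGroupStep sentences) ([], [])).1) none]
  set cov := bCov (groups.foldl (bGroupStep sentences) (([] : List String), ([] : List (Int × Int)))).2 with hcov_def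
  set T := ((PySem.List.pyRange 0 ((sentences.length : Int) + 1)).foldl
    (bScanStep sentences cov) ([], none)).1 with hT_def
  set cA := (groups.foldl (aGroupStep sentences) (([] : List String), PySem.Set.empty)).1
  set cB := (groups.foldl (bGroupStep sentences) (([] : List String), ([] : List (Int × Int)))).1
  have hAne : cA ++ T ≠ [] := by
    intro h
    obtain ⟨hA1, -⟩ := List.append_eq_nil_iff.mp h
    rw [hA1] at hlt
    simp at hlt
  rw [if_neg hAne]
  by_cases hB : cB ++ T = []
  · exfalso
    obtain ⟨hB1, hT⟩ := List.append_eq_nil_iff.mp hB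
    -- no spans were recorded, so nothing is covered; with n ≥ 2 the scan must emit a gap chunk
    have hsp := span_pairing sentences groups [] []
    have hcB : (groups.foldl (bGroupStep sentences) (([] : List String), ([] : List (Int × Int)))).1 = cB := rfl
    rw [hcB, hB1] at hsp
    simp only [List.length_nil] at hsp
    have hspans : (groups.foldl (bGroupStep sentences) (([] : List String), ([] : List (Int × Int)))).2 = [] :=
      List.eq_nil_of_length_eq_zero (by omega)
    have hcovf : ∀ i, cov i = false := by
      intro i
      rw [hcov_def, hspans]
      rfl
    have hfe : (PySem.List.pyRange 0 (sentences.length : Int)).filter (fun i => !cov i)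
        = PySem.List.pyRange 0 (sentences.length : Int) := by
      apply List.filter_eq_self.mpr
      intro i _
      rw [hcovf i]
      rfl
    have hcons : PySem.List.pyRange 0 (sentences.length : Int)
        = 0 :: PySem.List.pyRange 1 (sentences.length : Int) :=
      PySem.List.pyRange_one_cons (by omega)
    have := tail_eq sentences cov []
    rw [hfe, hcons] at this
    rw [hT_def, ← this] at hT
    simp only at hT
    exact absurd hT (by simp)
  · rw [if_neg hB]
    intro heq
    have hlen := congrArg List.length heq
    simp only [List.length_append] at hlen
    omega

-- ===== VERDICT (by name: the statement is the Claim_ definition above) =====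
theorem reassemble_py_spec : Claim_unchanged_reassemble_py := by
  intro sentences groups _ hpre
  unfold Spec_reassemble_py
  intro hnd
  exact ab_agree sentences groups hpre hnd

theorem reassemble_py_changed : Claim_changed_reassemble_py := by
  unfold Claim_changed_reassemble_py; decide

theorem reassemble_py_tight : Claim_exact_reassemble_py := by
  intro sentences groups _ hpre hd
  exact ab_differ sentences groups hpre hd
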